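-- pv_equiv track=rewrite | github.com/dsanmart/connect4 | victor.py | find_special_befores
-- ===== SOURCE A (Python) =====
-- def possible_actions(board):
--     """Returns a list of all directly playable actions (row, col) on a board."""
--     actions = []
--     for col in range(len(board[0])):
--         for row in range(len(board)):
--             if board[row][col] == '.':
--                 actions.append((row,col))
--                 break
--     # playable_cols = [x[1] for x in actions]
--     return actions
--
-- def is_true_special_before(board, external_playable_square, before):
--     """Function to check requirements for a special before.
--         Directly playable square is not in the same column as any empty square of the Before.
--     """
--     for square in before:
--         if board[square[0]][square[1]] == ".": # If square is empty
--             if external_playable_square[1] == square[1]: # If in same column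
--                 return False
--     return True
--
-- def find_special_befores(board, befores):
--     """Returns all the special befores on a board. This is a special version of the before.
--
--     Required:
--         A group without tokens from the opponent called Specialbefore group.
--         A directly playable square in another column.
--         All empty squares in the Specialbefore group should not lie in the upper row of the board.
--         One empty square of the Beforegroup must be playable.
--
--     Returns:
--         List with all special befores. Each special before group represented as (directly playable square in another column, before_group)
--     """
--     external_playable_actions = possible_actions(board)
--     special_befores = []
--     for external_action in external_playable_actions:
--         for before_group in befores:
--             playable_squares_in_before_group = []
--             for square in before_group:
--                 if (square in external_playable_actions) and (square not in special_befores):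
--                     playable_squares_in_before_group.append(square)
--             if len(playable_squares_in_before_group) >= 1:
--                 if is_true_special_before(board, external_action, before_group):
--                     special_befores.append((external_action, before_group))
--     return special_befores
-- ===== SOURCE B (Python) =====
-- def find_special_befores(board, befores):
--     # Transposed pairing: a single row-major sweep finds the first empty row of each
--     # column; then, group-major, each candidate before-group is distributed into
--     # per-external buckets keyed by its blocked-column set, and the buckets are
--     # flattened back in external order at the end.
--     width = len(board[0])
--     first = [None] * width
--     for r, row in enumerate(board):
--         first = [fr if fr is not None else (r if row[c] == '.' else None)
--                  for c, fr in enumerate(first)]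
--     playable = [(r, c) for c, r in enumerate(first) if r is not None]
--     playable_set = set(playable)
--     buckets = [[] for _ in playable]
--     for bg in befores:
--         if any(sq in playable_set for sq in bg):
--             blocked = {sq[1] for sq in bg if board[sq[0]][sq[1]] == '.'}
--             for bucket, ext in zip(buckets, playable):
--                 if ext[1] not in blocked:
--                     bucket.append(bg)
--     return [(ext, bg) for ext, bucket in zip(playable, buckets) for bg in bucket]
-- ===== Notes on version B (the rewrite author's own statement) =====
-- stated objective: alternative
-- what changed: B transposes the pairing: one row-major sweep computes the first empty row per column, then group-major each candidate before-group is distributed into per-external buckets via its precomputed blocked-column set, and the buckets are flattened in external order, instead of A's external-major nested rescans of every group (with the dead 'square not in special_befores' check) per external action.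
-- outside the precondition, e.g. on find_special_befores([['.', '.'], ['o']], [[(0, 0)]]): A returns [((0, 1), [(0, 0)])], B returns [((0, 1), [(0, 0)])]
import Mathlib
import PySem

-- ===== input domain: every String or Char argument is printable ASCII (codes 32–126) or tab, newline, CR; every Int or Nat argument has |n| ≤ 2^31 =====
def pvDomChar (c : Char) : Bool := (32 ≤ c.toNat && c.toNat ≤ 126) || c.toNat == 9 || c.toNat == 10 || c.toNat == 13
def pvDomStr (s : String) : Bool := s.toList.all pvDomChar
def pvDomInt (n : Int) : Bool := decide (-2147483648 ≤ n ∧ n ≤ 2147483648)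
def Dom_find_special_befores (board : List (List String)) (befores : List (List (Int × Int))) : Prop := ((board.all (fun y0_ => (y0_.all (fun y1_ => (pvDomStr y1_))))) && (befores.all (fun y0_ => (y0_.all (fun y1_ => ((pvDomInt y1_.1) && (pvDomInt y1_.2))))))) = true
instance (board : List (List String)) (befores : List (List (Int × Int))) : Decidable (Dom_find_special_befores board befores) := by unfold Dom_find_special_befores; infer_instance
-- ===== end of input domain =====

-- B transposes the pairing loops: a row-major sweep finds the first empty row per column, then
-- group-major distribution into per-external buckets (flattened in external order) replaces A's
-- external-major rescans; same return value on Pre_ (alternative decomposition, not claimed faster).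


-- shared helper: board[r][c] via Python indexing; exact on Pre_ (both indices in range there),
-- Python raises exactly where a pyGet? is none, and Pre_ excludes those inputs
def pvCell (board : List (List String)) (r c : Int) : String :=
  (PySem.List.pyGet? ((PySem.List.pyGet? board r).getD []) c).getD ""

-- ===== PORT A =====
-- inner 'for row in range(len(board)): if board[row][col]=='.': append; break'
def pvFirstDotA (board : List (List String)) (col : Nat) : List Nat → Option Nat
  | [] => none
  | r :: rest =>
    if pvCell board (r : Int) (col : Int) = "." then some r else pvFirstDotA board col rest

def possible_actions (board : List (List String)) : List (Int × Int) :=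
  (List.range (board.headD []).length).foldl
    (fun actions col =>
      match pvFirstDotA board col (List.range board.length) with
      | some r => actions ++ [((r : Int), (col : Int))]
      | none => actions) []

def is_true_special_before (board : List (List String)) (ext : Int × Int) :
    List (Int × Int) → Bool
  | [] => true
  | sq :: rest =>
    if pvCell board sq.1 sq.2 = "." ∧ ext.2 = sq.2 then false
    else is_true_special_before board ext rest

def find_special_befores (board : List (List String)) (befores : List (List (Int × Int))) : List ((Int × Int) × (List (Int × Int))) :=
  let epa := possible_actions board
  epa.foldl
    (fun special ext =>
      befores.foldl
        (fun special bg =>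
          -- Python 'square not in special_befores': an (Int,Int) tuple never equals an
          -- (action, group) pair under Python ==, so the membership test is vacuously false
          let psq := bg.foldl
            (fun acc sq =>
              if sq ∈ epa ∧ special.any (fun _ => false) = false then acc ++ [sq] else acc) []
          if 1 ≤ psq.length then
            if is_true_special_before board ext bg then special ++ [(ext, bg)] else special
          else special)
        special)
    []

-- ===== PORT B =====
-- 'first = [None]*width; for r, row in enumerate(board): first = [fr if fr is not None else …]'
def pvAltFirst (board : List (List String)) : List (Option Int) :=
  (PySem.List.enumerate board).foldl
    (fun (first : List (Option Int)) p =>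
      (PySem.List.enumerate first).map (fun q =>
        match q.2 with
        | some v => some v
        | none => if (PySem.List.pyGet? p.2 q.1).getD "" = "." then some p.1 else none))
    (List.replicate (board.headD []).length none)

-- 'playable = [(r, c) for c, r in enumerate(first) if r is not None]'
def pvAltPlayable (board : List (List String)) : List (Int × Int) :=
  (PySem.List.enumerate (pvAltFirst board)).foldl
    (fun pl q => match q.2 with
      | some r => pl ++ [(r, q.1)]
      | none => pl) []

-- group-major distribution of the candidate groups into one bucket per external action
def pvAltBuckets (board : List (List String)) (befores : List (List (Int × Int))) : List (List (List (Int × Int))) :=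
  let playable := pvAltPlayable board
  let pset : PySem.Set (Int × Int) := PySem.Set.ofList playable
  befores.foldl
    (fun buckets bg =>
      if bg.any (fun sq => PySem.Set.contains pset sq) then
        let blocked : PySem.Set Int :=
          PySem.Set.ofList ((bg.filter (fun sq => pvCell board sq.1 sq.2 == ".")).map (·.2))
        List.zipWith (fun bucket ext =>
            if !(PySem.Set.contains blocked ext.2) then bucket ++ [bg] else bucket)
          buckets playable
      else buckets)
    (playable.map (fun _ => []))

-- '[(ext, bg) for ext, bucket in zip(playable, buckets) for bg in bucket]'
def find_special_befores_alt (board : List (List String)) (befores : List (List (Int × Int))) : List ((Int × Int) × (List (Int × Int))) :=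
  ((pvAltPlayable board).zip (pvAltBuckets board befores)).foldl
    (fun res p => res ++ p.2.map (fun bg => (p.1, bg))) []

-- ===== PRECONDITION & SPEC =====
-- closed-form 'first empty cell of its column' (what 'directly playable' means on a board)
def pvPlayableCell (board : List (List String)) (sq : Int × Int) : Bool :=
  decide (∃ r < board.length, ∃ c < (board.headD []).length,
    sq = ((r : Int), (c : Int)) ∧ (((board[r]?).getD [])[c]?).getD "" = "." ∧
    ∀ r' < r, (((board[r']?).getD [])[c]?).getD "" ≠ ".")

def pvSqInRange (board : List (List String)) (sq : Int × Int) : Prop :=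
  PySem.Raise.InRange board.length sq.1 ∧
  PySem.Raise.InRange ((PySem.List.pyGet? board sq.1).getD []).length sq.2

-- Pre_ excludes the inputs on which Python A raises an IndexError: the empty board, boards with a
-- row shorter than row 0 (reached by the column scan), and before-groups that contain a playable
-- square together with an out-of-range square; the row-length and in-range clauses are slightly
-- wider than strictly necessary (a '.' or an early same-column return can skip the bad access),
-- so a few ragged/out-of-range inputs on which A still returns are also excluded.
def Pre_find_special_befores (board : List (List String)) (befores : List (List (Int × Int))) : Prop :=
  board ≠ [] ∧
  (∀ row ∈ board, (board.headD []).length ≤ row.length) ∧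
  (∀ bg ∈ befores, (∃ sq ∈ bg, pvPlayableCell board sq = true) → ∀ sq ∈ bg, pvSqInRange board sq)

instance (board : List (List String)) (befores : List (List (Int × Int))) : Decidable (Pre_find_special_befores board befores) := by
  unfold Pre_find_special_befores pvSqInRange; infer_instance

def pvWitness_find_special_befores : List (List String) × (List (List (Int × Int))) :=
  ([[".", "x"], ["o", "."]], [[(0, 0), (1, 1)]])

def Spec_find_special_befores (board : List (List String)) (befores : List (List (Int × Int))) (out : List ((Int × Int) × (List (Int × Int)))) : Prop := out = find_special_befores_alt board befores
instance (board : List (List String)) (befores : List (List (Int × Int))) (out : List ((Int × Int) × (List (Int × Int)))) : Decidable (Spec_find_special_befores board befores out) := by unfold Spec_find_special_befores; infer_instance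

-- ===== CLAIM (what is proved, stated in full; the proofs are below) =====
def Claim_equal_find_special_befores : Prop := ∀ (board : List (List String)) (befores : List (List (Int × Int))), Dom_find_special_befores board befores → Pre_find_special_befores board befores → Spec_find_special_befores board befores (find_special_befores board befores)

-- ===== LEMMAS AND PROOFS =====

-- canonical pieces both sides are reduced to
def pvCand (epa : List (Int × Int)) (bg : List (Int × Int)) : Bool :=
  bg.any (fun sq => decide (sq ∈ epa))

def pvPass (board : List (List String)) (ext : Int × Int) (bg : List (Int × Int)) : Bool :=
  bg.all (fun sq => !(pvCell board sq.1 sq.2 == "." && sq.2 == ext.2))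

def pvFirstDot (board : List (List String)) (c : Nat) : Option Nat :=
  (List.range board.length).find? (fun r : Nat => pvCell board (r : Int) (c : Int) == ".")

-- first row index whose cell in column c is '.', as a relative index / with enumerate indices
def pvFd (c : Int) : List (List String) → Option Nat
  | [] => none
  | row :: rest =>
    if (PySem.List.pyGet? row c).getD "" = "." then some 0 else (pvFd c rest).map (· + 1)

def pvScan (c : Int) : List (Int × List String) → Option Int
  | [] => none
  | p :: rest =>
    if (PySem.List.pyGet? p.2 c).getD "" = "." then some p.1 else pvScan c rest

theorem pvFind?_congr {α : Type} (l : List α) (p q : α → Bool)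
    (h : ∀ x ∈ l, p x = q x) : l.find? p = l.find? q := by
  induction l with
  | nil => rfl
  | cons x xs ih =>
    have hx := h x (by simp)
    by_cases hp : p x = true
    · rw [List.find?_cons_of_pos hp, List.find?_cons_of_pos (hx ▸ hp)]
    · rw [List.find?_cons_of_neg hp,
        List.find?_cons_of_neg (by rw [← hx]; exact hp),
        ih (fun y hy => h y (by simp [hy]))]

theorem pvEnum_map_range {α : Type} (f : Nat → α) (w : Nat) (s : Int) :
    PySem.List.enumerate ((List.range w).map f) s
      = (List.range w).map (fun (k : Nat) => (((s + (k : Int)) : Int), f k)) := by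
  induction w generalizing s with
  | zero => simp [PySem.List.enumerate_nil]
  | succ w ih =>
    rw [List.range_succ, List.map_append, PySem.List.enumerate_append, ih,
      List.map_append]
    simp [PySem.List.enumerate_cons, PySem.List.enumerate_nil]

theorem pvFirstDotA_eq_find? (board : List (List String)) (col : Nat) (rows : List Nat) :
    pvFirstDotA board col rows
      = rows.find? (fun r : Nat => pvCell board (r : Int) (col : Int) == ".") := by
  induction rows with
  | nil => rfl
  | cons r rest ih =>
    by_cases h : pvCell board (r : Int) (col : Int) = "."
    · simp [pvFirstDotA, h]
    · simp [pvFirstDotA, h, ih]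

theorem pvIsTrue_eq_all (board : List (List String)) (ext : Int × Int)
    (bg : List (Int × Int)) :
    is_true_special_before board ext bg = pvPass board ext bg := by
  induction bg with
  | nil => rfl
  | cons sq rest ih =>
    rcases ext with ⟨e1, e2⟩
    rcases sq with ⟨s1, s2⟩
    simp only [is_true_special_before, pvPass, List.all_cons] at *
    by_cases h1 : pvCell board s1 s2 = "."
    · by_cases h2 : e2 = s2
      · subst h2; simp [h1]
      · have h2' : ¬ s2 = e2 := fun e => h2 e.symm
        simp [h1, h2, h2', ih]
    · simp [h1, ih]

theorem pvPsq_eq_filter (epa : List (Int × Int))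
    (special : List ((Int × Int) × List (Int × Int))) (bg : List (Int × Int)) :
    bg.foldl (fun acc sq =>
        if sq ∈ epa ∧ special.any (fun _ => false) = false then acc ++ [sq] else acc) []
      = bg.filter (fun sq => decide (sq ∈ epa)) := by
  have hfun : (fun (acc : List (Int × Int)) sq =>
        if sq ∈ epa ∧ special.any (fun _ => false) = false then acc ++ [sq] else acc)
      = (fun acc sq => if sq ∈ epa then acc ++ [sq] else acc) := by
    funext acc sq; simp
  rw [hfun]
  simpa using PySem.List.foldl_append_ite_eq_filter (fun sq => sq ∈ epa) bg ([] : List (Int × Int))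

theorem pvCand_eq_len (epa : List (Int × Int)) (bg : List (Int × Int)) :
    pvCand epa bg = decide (1 ≤ (bg.filter (fun sq => decide (sq ∈ epa))).length) := by
  unfold pvCand
  by_cases h : ∃ sq ∈ bg, sq ∈ epa
  · obtain ⟨sq, hsq, hmem⟩ := h
    have h1 : bg.any (fun sq => decide (sq ∈ epa)) = true := by
      simp only [List.any_eq_true]; exact ⟨sq, hsq, by simp [hmem]⟩
    have h2 : sq ∈ bg.filter (fun sq => decide (sq ∈ epa)) := by
      simp [List.mem_filter, hsq, hmem]
    have : 0 < (bg.filter (fun sq => decide (sq ∈ epa))).length :=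
      List.length_pos_of_mem h2
    rw [h1]; simp; omega
  · have h' : ∀ sq ∈ bg, sq ∉ epa := fun sq hsq hmem => h ⟨sq, hsq, hmem⟩
    have h1 : bg.any (fun sq => decide (sq ∈ epa)) = false := by
      simp only [List.any_eq_false]; intro sq hsq; simp [h' sq hsq]
    have h2 : bg.filter (fun sq => decide (sq ∈ epa)) = [] := by
      apply List.filter_eq_nil_iff.mpr; intro sq hsq; simp [h' sq hsq]
    rw [h1, h2]; simp

-- A's inner fold over befores, in closed form
theorem pvInnerA_eq (board : List (List String)) (befores : List (List (Int × Int)))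
    (epa : List (Int × Int)) (ext : Int × Int)
    (special : List ((Int × Int) × List (Int × Int))) :
    befores.foldl
        (fun special bg =>
          let psq := bg.foldl
            (fun acc sq =>
              if sq ∈ epa ∧ special.any (fun _ => false) = false then acc ++ [sq] else acc) []
          if 1 ≤ psq.length then
            if is_true_special_before board ext bg then special ++ [(ext, bg)] else special
          else special)
        special
      = special ++ ((befores.filter (pvCand epa)).filter (pvPass board ext)).map (fun bg => (ext, bg)) := by
  calc befores.foldl _ special
      = befores.foldl (fun s bg => if (pvCand epa bg && pvPass board ext bg) = true then s ++ [(ext, bg)] else s) special := by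
        apply PySem.List.foldl_congr_mem
        intro s bg _
        simp only [pvPsq_eq_filter epa s bg, pvIsTrue_eq_all]
        rw [pvCand_eq_len]
        by_cases h1 : 1 ≤ (bg.filter (fun sq => decide (sq ∈ epa))).length
        · by_cases h2 : pvPass board ext bg = true <;> simp [h1, h2]
        · simp [h1]
    _ = special ++ (befores.filter (fun bg => pvCand epa bg && pvPass board ext bg)).map (fun bg => (ext, bg)) :=
        PySem.List.foldl_append_if _ _ befores special
    _ = _ := by
        have hcomm : (fun bg => pvPass board ext bg && pvCand epa bg)
            = (fun bg => pvCand epa bg && pvPass board ext bg) := by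
          funext bg; rw [Bool.and_comm]
        rw [List.filter_filter, hcomm]

-- the row-major sweep computes, column by column, the first '.'-row among the enumerated rows
theorem pvRowFold_eq (rows : List (Int × List String)) (w : Nat) (h : Nat → Option Int) :
    rows.foldl
        (fun (first : List (Option Int)) p =>
          (PySem.List.enumerate first).map (fun q =>
            match q.2 with
            | some v => some v
            | none => if (PySem.List.pyGet? p.2 q.1).getD "" = "." then some p.1 else none))
        ((List.range w).map h)
      = (List.range w).map (fun c =>
          match h c with
          | some v => some v
          | none => pvScan (c : Int) rows) := by
  induction rows generalizing h with
  | nil =>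
    simp only [List.foldl_nil]
    apply List.map_congr_left
    intro c _
    cases h c <;> simp [pvScan]
  | cons p rest ih =>
    rw [List.foldl_cons]
    have hstep : (PySem.List.enumerate ((List.range w).map h)).map (fun q =>
          match q.2 with
          | some v => some v
          | none => if (PySem.List.pyGet? p.2 q.1).getD "" = "." then some p.1 else none)
        = (List.range w).map (fun c =>
            match h c with
            | some v => some v
            | none => if (PySem.List.pyGet? p.2 (c : Int)).getD "" = "." then some p.1 else none) := by
      rw [pvEnum_map_range h w 0, List.map_map]
      apply List.map_congr_left
      intro c _
      simp
    rw [hstep, ih]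
    apply List.map_congr_left
    intro c _
    cases hc : h c with
    | some v => simp
    | none =>
      simp only [pvScan]
      split_ifs with hcell <;> rfl

theorem pvScan_enumerate (board : List (List String)) (c : Int) (s : Int) :
    pvScan c (PySem.List.enumerate board s) = (pvFd c board).map (fun k => s + (k : Int)) := by
  induction board generalizing s with
  | nil => simp [PySem.List.enumerate_nil, pvScan, pvFd]
  | cons row rest ih =>
    rw [PySem.List.enumerate_cons]
    by_cases hcell : (PySem.List.pyGet? row c).getD "" = "."
    · simp [pvScan, pvFd, hcell]
    · simp only [pvScan, pvFd, hcell, if_false, ih (s + 1)]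
      cases pvFd c rest with
      | none => simp
      | some k => simp; omega

theorem pvFd_eq_firstDot (board : List (List String)) (c : Nat) :
    pvFd (c : Int) board = pvFirstDot board c := by
  unfold pvFirstDot
  induction board with
  | nil => simp [pvFd]
  | cons row rest ih =>
    rw [List.length_cons, List.range_succ_eq_map]
    by_cases hcell : row[c]?.getD "" = "."
    · rw [List.find?_cons_of_pos (by
        show (pvCell (row :: rest) ((0 : Nat) : Int) (c : Int) == ".") = true
        simp only [pvCell, PySem.List.pyGet?_natCast, List.getElem?_cons_zero, Option.getD_some]
        simp [hcell])]
      simp [pvFd, PySem.List.pyGet?_natCast, hcell]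
    · rw [List.find?_cons_of_neg (by
        show ¬ (pvCell (row :: rest) ((0 : Nat) : Int) (c : Int) == ".") = true
        simp only [pvCell, PySem.List.pyGet?_natCast, List.getElem?_cons_zero, Option.getD_some]
        simp [hcell])]
      rw [List.find?_map]
      have hpred : ∀ r ∈ List.range rest.length,
          ((fun r : Nat => pvCell (row :: rest) (r : Int) (c : Int) == ".") ∘ (· + 1)) r
            = (fun r : Nat => pvCell rest (r : Int) (c : Int) == ".") r := by
        intro r _
        simp only [Function.comp]
        have : pvCell (row :: rest) ((r + 1 : Nat) : Int) (c : Int) = pvCell rest (r : Int) (c : Int) := by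
          simp [pvCell, PySem.List.pyGet?_natCast]
        rw [this]
      rw [pvFind?_congr _ _ _ hpred, ← ih]
      simp [pvFd, PySem.List.pyGet?_natCast, hcell]

-- B's first list, columnwise
theorem pvAltFirst_eq (board : List (List String)) :
    pvAltFirst board
      = (List.range (board.headD []).length).map
          (fun c => (pvFirstDot board c).map (fun r => (r : Int))) := by
  unfold pvAltFirst
  rw [show (List.replicate (board.headD []).length (none : Option Int))
        = (List.range (board.headD []).length).map (fun _ => none) by
      rw [List.map_const']; simp]
  rw [pvRowFold_eq]
  apply List.map_congr_left
  intro c _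
  simp only []
  rw [pvScan_enumerate board (c : Int) 0, pvFd_eq_firstDot]
  cases pvFirstDot board c <;> simp

-- B's playable list is A's possible_actions
theorem pvAltPlayable_eq (board : List (List String)) :
    pvAltPlayable board = possible_actions board := by
  unfold pvAltPlayable possible_actions
  rw [pvAltFirst_eq, pvEnum_map_range, List.foldl_map]
  apply PySem.List.foldl_congr_mem
  intro pl c _
  rw [show pvFirstDotA board c (List.range board.length) = pvFirstDot board c from
    pvFirstDotA_eq_find? board c (List.range board.length)]
  cases pvFirstDot board c <;> simp

-- membership in the playable set is membership in epa
theorem pvCandB_eq (epa : List (Int × Int)) (bg : List (Int × Int)) :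
    bg.any (fun sq => PySem.Set.contains (PySem.Set.ofList epa) sq) = pvCand epa bg := by
  have hx : ∀ sq : Int × Int,
      PySem.Set.contains (PySem.Set.ofList epa) sq = decide (sq ∈ epa) := by
    intro sq
    rw [PySem.Set.contains_eq_decide]
    simp [PySem.Set.mem_ofList]
  unfold pvCand
  simp only [hx]

-- the blocked-column set test is A's per-square column test
theorem pvBlocked_eq (board : List (List String)) (ext : Int × Int) (bg : List (Int × Int)) :
    (!(PySem.Set.contains
        (PySem.Set.ofList ((bg.filter (fun sq => pvCell board sq.1 sq.2 == ".")).map (·.2)))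
        ext.2))
      = pvPass board ext bg := by
  have hiff : (PySem.Set.contains
        (PySem.Set.ofList ((bg.filter (fun sq => pvCell board sq.1 sq.2 == ".")).map (·.2)))
        ext.2) = true
      ↔ ¬ (pvPass board ext bg = true) := by
    rw [PySem.Set.contains_eq_decide]
    unfold pvPass
    simp [List.mem_map, List.mem_filter, List.all_eq_true, PySem.Set.mem_ofList]
  by_cases hp : pvPass board ext bg = true
  · have hc : PySem.Set.contains
        (PySem.Set.ofList ((bg.filter (fun sq => pvCell board sq.1 sq.2 == ".")).map (·.2)))
        ext.2 = false := by
      rw [Bool.eq_false_iff]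
      intro hcc
      exact (hiff.mp hcc) hp
    rw [hc, hp]
    rfl
  · have hc := hiff.mpr hp
    rw [hc, Bool.eq_false_iff.mpr hp]
    rfl

theorem pvZipWith_map_self {α β : Type} (f : β → α → β) (h : α → β) (l : List α) :
    List.zipWith f (l.map h) l = l.map (fun x => f (h x) x) := by
  induction l with
  | nil => rfl
  | cons x xs ih => simp [ih]

theorem pvZip_map_self {α β : Type} (g : α → β) (l : List α) :
    l.zip (l.map g) = l.map (fun x => (x, g x)) := by
  induction l with
  | nil => rfl
  | cons x xs ih => simp [ih]

-- the bucket fold, in closed form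
theorem pvBucketsFold_eq (board : List (List String)) (bs : List (List (Int × Int)))
    (playable : List (Int × Int)) (h : (Int × Int) → List (List (Int × Int))) :
    bs.foldl
        (fun buckets bg =>
          if bg.any (fun sq => PySem.Set.contains (PySem.Set.ofList playable) sq) then
            List.zipWith (fun bucket ext =>
                if !(PySem.Set.contains
                    (PySem.Set.ofList ((bg.filter (fun sq => pvCell board sq.1 sq.2 == ".")).map (·.2)))
                    ext.2) then bucket ++ [bg] else bucket)
              buckets playable
          else buckets)
        (playable.map h)
      = playable.map (fun ext => h ext ++ (bs.filter (pvCand playable)).filter (pvPass board ext)) := by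
  induction bs generalizing h with
  | nil => simp
  | cons bg rest ih =>
    rw [List.foldl_cons]
    by_cases hcand : pvCand playable bg = true
    · rw [if_pos (by rw [pvCandB_eq]; exact hcand)]
      rw [pvZipWith_map_self]
      have hstep : (fun ext =>
            if !(PySem.Set.contains
                (PySem.Set.ofList ((bg.filter (fun sq => pvCell board sq.1 sq.2 == ".")).map (·.2)))
                ext.2) then h ext ++ [bg] else h ext)
          = (fun ext => if pvPass board ext bg then h ext ++ [bg] else h ext) := by
        funext ext
        rw [pvBlocked_eq]
      rw [hstep, ih]
      apply List.map_congr_left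
      intro ext _
      rw [List.filter_cons, if_pos hcand, List.filter_cons]
      by_cases hp : pvPass board ext bg = true
      · simp [hp]
      · simp [hp]
    · rw [if_neg (by rw [pvCandB_eq]; exact hcand)]
      rw [ih]
      apply List.map_congr_left
      intro ext _
      rw [List.filter_cons, if_neg (by simpa using hcand)]

-- ===== VERDICT (by name: the statement is the Claim_ definition above) =====
theorem find_special_befores_spec : Claim_equal_find_special_befores := by
  intro board befores _ _
  unfold Spec_find_special_befores
  simp only [find_special_befores, find_special_befores_alt, pvAltBuckets, pvAltPlayable_eq]
  rw [pvBucketsFold_eq board befores (possible_actions board) (fun _ => [])]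
  rw [pvZip_map_self, List.foldl_map]
  simp only [List.nil_append]
  apply PySem.List.foldl_congr_mem
  intro special ext _
  rw [pvInnerA_eq board befores (possible_actions board) ext special]
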